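-- pv_equiv track=rewrite | github.com/Joshua992700/ESEC-Portal | has_consecutive_three_digits.py | has_consecutive_three_digits
-- ===== SOURCE A (Python) =====
-- def has_consecutive_three_digits(num):
--     # Convert the number to a string to iterate through digits
--     num_str = str(num)
--
--     for i in range(len(num_str) - 2):
--         # Get three consecutive digits
--         first = int(num_str[i])
--         second = int(num_str[i + 1])
--         third = int(num_str[i + 2])
--
--         # Check for increasing order
--         if first + 1 == second and second + 1 == third:
--             return 'Yes'
--
--         # Check for decreasing order
--         if first - 1 == second and second - 1 == third:
--             return 'Yes'
--
--     return 'No'  # Return 'No' if no such sequence is found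
-- ===== SOURCE B (Python) =====
-- def has_consecutive_three_digits(num):
--     s = str(num)
--     if len(s) < 3:
--         return 'No'
--     prev = int(s[0])
--     inc = dec = 1
--     for ch in s[1:]:
--         d = int(ch)
--         inc = inc + 1 if d == prev + 1 else 1
--         dec = dec + 1 if d == prev - 1 else 1
--         if inc == 3 or dec == 3:
--             return 'Yes'
--         prev = d
--     return 'No'
-- ===== Notes on version B (the rewrite author's own statement) =====
-- stated objective: alternative
-- what changed: Replaces A's 3-wide index-window scan (three int() conversions and lookups per position) with a single stateful left-to-right pass keeping increasing/decreasing run-length counters and one conversion per digit.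
import Mathlib
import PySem

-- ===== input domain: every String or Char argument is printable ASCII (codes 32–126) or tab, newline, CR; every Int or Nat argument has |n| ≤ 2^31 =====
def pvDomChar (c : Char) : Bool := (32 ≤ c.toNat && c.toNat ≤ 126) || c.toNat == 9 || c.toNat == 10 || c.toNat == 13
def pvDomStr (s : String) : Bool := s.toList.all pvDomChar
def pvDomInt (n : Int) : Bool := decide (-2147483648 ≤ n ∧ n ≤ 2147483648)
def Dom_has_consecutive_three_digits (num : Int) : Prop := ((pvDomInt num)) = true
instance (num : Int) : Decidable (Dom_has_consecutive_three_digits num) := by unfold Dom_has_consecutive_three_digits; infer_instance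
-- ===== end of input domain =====

-- B replaces A's 3-wide index-window scan with a single stateful pass keeping
-- increasing/decreasing run-length counters (alternative decomposition, same cost).

-- int(single character), as both Pythons apply it to characters of str(num);
-- exact on digit characters (on '-' Python raises ValueError — outside Pre_ — and this returns 0)
def pyDigit (c : Char) : Int := (PySem.Int.ofStr? (String.ofList [c])).getD 0

-- ===== PORT A =====
-- A's for-loop over range(len-2) with early return, as recursion on the index
def loopA (s : List Char) (i : Nat) : String :=
  if _h : i + 2 < s.length then
    let first := pyDigit (s.getD i ' ')
    let second := pyDigit (s.getD (i+1) ' ')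
    let third := pyDigit (s.getD (i+2) ' ')
    if first + 1 == second && second + 1 == third then "Yes"
    else if first - 1 == second && second - 1 == third then "Yes"
    else loopA s (i+1)
  else "No"
termination_by s.length - i

def has_consecutive_three_digits (num : Int) : String :=
  loopA (PySem.Int.toStr num).toList 0

-- ===== PORT B =====
-- B's for-loop over the remaining characters, carrying prev and the two run counters
def loopB : List Char → Int → Int → Int → String
  | [], _, _, _ => "No"
  | c :: rest, prev, inc, dec =>
    let d := pyDigit c
    let inc' := if d == prev + 1 then inc + 1 else 1
    let dec' := if d == prev - 1 then dec + 1 else 1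
    if inc' == 3 || dec' == 3 then "Yes" else loopB rest d inc' dec'

def has_consecutive_three_digits_alt (num : Int) : String :=
  let s := (PySem.Int.toStr num).toList
  if s.length < 3 then "No"
  else
    match s with
    | [] => "No"
    | c :: rest => loopB rest (pyDigit c) 1 1

-- ===== PRECONDITION & SPEC =====
-- Pre_ excludes num ≤ -10: there str(num) has length ≥ 3 starting with '-', and A raises
-- ValueError on int('-') (B raises there too).
def Pre_has_consecutive_three_digits (num : Int) : Prop := -9 ≤ num
instance (num : Int) : Decidable (Pre_has_consecutive_three_digits num) := by unfold Pre_has_consecutive_three_digits; infer_instance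
def pvWitness_has_consecutive_three_digits : Int := 123

def Spec_has_consecutive_three_digits (num : Int) (out : String) : Prop := out = has_consecutive_three_digits_alt num
instance (num : Int) (out : String) : Decidable (Spec_has_consecutive_three_digits num out) := by unfold Spec_has_consecutive_three_digits; infer_instance

-- ===== CLAIM (what is proved, stated in full; the proofs are below) =====
def Claim_equal_has_consecutive_three_digits : Prop := ∀ (num : Int), Dom_has_consecutive_three_digits num → Pre_has_consecutive_three_digits num → Spec_has_consecutive_three_digits num (has_consecutive_three_digits num)

-- ===== LEMMAS AND PROOFS =====

-- window predicate: some 3 consecutive entries are increasing or decreasing by 1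
def trip (a b c : Int) : Bool := (a + 1 == b && b + 1 == c) || (a - 1 == b && b - 1 == c)

def wA : List Int → Bool
  | a :: b :: c :: t => trip a b c || wA (b :: c :: t)
  | _ => false

def nextIs : List Int → Int → Bool
  | [], _ => false
  | d :: _, v => d == v

theorem wA_short (l : List Int) (h : l.length < 3) : wA l = false := by
  match l, h with
  | [], _ => rfl
  | [a], _ => rfl
  | [a, b], _ => rfl
  | a :: b :: c :: t, h => exact absurd h (by simp)

theorem loopA_eq (s : List Char) (i : Nat) :
    loopA s i = if wA ((s.drop i).map pyDigit) then "Yes" else "No" := by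
  rw [loopA]
  by_cases h : i + 2 < s.length
  · rw [dif_pos h]
    have h0 : i < s.length := by omega
    have h1 : i + 1 < s.length := by omega
    have e0 : s.drop i = s[i] :: s.drop (i + 1) := List.drop_eq_getElem_cons h0
    have e1 : s.drop (i + 1) = s[i + 1] :: s.drop (i + 2) := List.drop_eq_getElem_cons h1
    have e2 : s.drop (i + 2) = s[i + 2] :: s.drop (i + 3) := List.drop_eq_getElem_cons h
    have ih := loopA_eq s (i + 1)
    rw [e0, e1, e2] at *
    simp only [List.getD_eq_getElem?_getD, List.getElem?_eq_getElem h0,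
      List.getElem?_eq_getElem h1, List.getElem?_eq_getElem h, Option.getD_some] at *
    simp only [List.map_cons, wA, trip] at *
    rw [ih]
    by_cases c1 : pyDigit s[i] + 1 = pyDigit s[i + 1] ∧ pyDigit s[i + 1] + 1 = pyDigit s[i + 2]
    · simp [c1.1, c1.2]
    · by_cases c2 : pyDigit s[i] - 1 = pyDigit s[i + 1] ∧ pyDigit s[i + 1] - 1 = pyDigit s[i + 2]
      · simp [c2.1, c2.2]
      · have b1 : ((pyDigit s[i] + 1 == pyDigit s[i + 1]) && (pyDigit s[i + 1] + 1 == pyDigit s[i + 2])) = false := by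
          rw [Bool.and_eq_false_iff]; by_cases q : pyDigit s[i] + 1 = pyDigit s[i + 1] <;> simp_all
        have b2 : ((pyDigit s[i] - 1 == pyDigit s[i + 1]) && (pyDigit s[i + 1] - 1 == pyDigit s[i + 2])) = false := by
          rw [Bool.and_eq_false_iff]; by_cases q : pyDigit s[i] - 1 = pyDigit s[i + 1] <;> simp_all
        simp [b1, b2]
  · rw [dif_neg h]
    have : wA (List.drop i (List.map pyDigit s)) = false := by
      apply wA_short; simp [List.length_drop]; omega
    simp [this]
termination_by s.length - i

theorem loopB_eq (rest : List Char) (prev inc dec : Int)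
    (hi : inc = 1 ∨ inc = 2) (hd : dec = 1 ∨ dec = 2) :
    loopB rest prev inc dec =
      if wA (prev :: rest.map pyDigit)
          || (decide (inc = 2) && nextIs (rest.map pyDigit) (prev + 1))
          || (decide (dec = 2) && nextIs (rest.map pyDigit) (prev - 1))
      then "Yes" else "No" := by
  induction rest generalizing prev inc dec with
  | nil =>
    rcases hi with h1 | h1 <;> rcases hd with h2 | h2 <;>
      simp [loopB, wA, nextIs, h1, h2]
  | cons c u ih =>
    simp only [loopB, List.map_cons]
    by_cases e1 : pyDigit c = prev + 1
    · have E1 : (pyDigit c == prev + 1) = true := by simp [e1]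
      have E2 : (pyDigit c == prev - 1) = false := by simp [e1]; omega
      have Epm : ((prev + 1 == prev - 1) : Bool) = false := by simp; omega
      simp only [E1, E2]
      norm_num
      rcases hi with hinc | hinc <;> subst hinc
      · rw [if_neg (by norm_num), ih (pyDigit c) (1 + 1) 1 (by norm_num) (Or.inl rfl)]
        simp only [e1]
        cases u with
        | nil => simp [wA, nextIs]; omega
        | cons c2 u2 =>
          simp only [List.map_cons, wA, trip, nextIs]
          have h1 : ((prev + 1 == prev + 1) : Bool) = true := by simp
          have h2 : ((prev - 1 == prev + 1) : Bool) = false := by simp; omega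
          simp [h2, Epm]
          by_cases f : prev + 1 + 1 = pyDigit c2
          · simp [f]
          · simp [f, Ne.symm f]
      · simp [nextIs, E1]
    · by_cases e2 : pyDigit c = prev - 1
      · have E1 : (pyDigit c == prev + 1) = false := by simp [e2]; omega
        have E2 : (pyDigit c == prev - 1) = true := by simp [e2]
        have Emp : ((prev - 1 == prev + 1) : Bool) = false := by simp; omega
        simp only [E1, E2]
        norm_num
        rcases hd with hdec | hdec <;> subst hdec
        · rw [if_neg (by norm_num), ih (pyDigit c) 1 (1 + 1) (Or.inl rfl) (by norm_num)]
          simp only [e2]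
          cases u with
          | nil => simp [wA, nextIs]; omega
          | cons c2 u2 =>
            simp only [List.map_cons, wA, trip, nextIs]
            have h1 : ((prev - 1 == prev - 1) : Bool) = true := by simp
            have h2 : ((prev + 1 == prev - 1) : Bool) = false := by simp; omega
            simp [h2, Emp]
            by_cases f : prev - 1 - 1 = pyDigit c2
            · simp [f]
            · simp [f, Ne.symm f]
        · simp [nextIs, E2]
      · have E1 : (pyDigit c == prev + 1) = false := by simp [e1]
        have E2 : (pyDigit c == prev - 1) = false := by simp [e2]
        simp only [E1, E2]
        norm_num
        rw [ih (pyDigit c) 1 1 (Or.inl rfl) (Or.inl rfl)]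
        cases u with
        | nil => simp [wA, nextIs, E1, E2]
        | cons c2 u2 =>
          simp only [List.map_cons, wA, trip, nextIs]
          have h1 : ((prev + 1 == pyDigit c) : Bool) = false := by
            simp; omega
          have h2 : ((prev - 1 == pyDigit c) : Bool) = false := by
            simp; omega
          simp [h1, h2, E1, E2]

-- ===== VERDICT (by name: the statement is the Claim_ definition above) =====
theorem has_consecutive_three_digits_spec : Claim_equal_has_consecutive_three_digits := by
  intro num _ _
  unfold Spec_has_consecutive_three_digits has_consecutive_three_digits has_consecutive_three_digits_alt
  rw [loopA_eq]
  simp only [List.drop_zero]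
  cases hs : (PySem.Int.toStr num).toList with
  | nil => simp [wA]
  | cons c rest =>
    simp only [List.map_cons, List.length_cons]
    by_cases hlen : rest.length + 1 < 3
    · have hw : wA (pyDigit c :: rest.map pyDigit) = false := by
        match rest, hlen with
        | [], _ => rfl
        | [b], _ => rfl
        | b :: d :: t, h => exact absurd h (by simp)
      rw [if_pos hlen]; simp [hw]
    · rw [if_neg hlen, loopB_eq rest (pyDigit c) 1 1 (Or.inl rfl) (Or.inl rfl)]
      simp
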